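-- pv_equiv track=rewrite | github.com/sungin95/TIL | python/코드테스트(연습)/백준/22y12m/피자나눠먹기.py | solution
-- ===== SOURCE A (Python) =====
-- def solution(n):
--     cnt = 0
--     while True:
--         cnt += 1
--         if (n * cnt) % 6 == 0:
--             answer = (n * cnt) // 6
--             break
--     return answer
-- ===== SOURCE B (Python) =====
-- def solution(n):
--     # closed form: answer = n // gcd(n, 6), no loop
--     if n % 6 == 0:
--         g = 6
--     elif n % 3 == 0:
--         g = 3
--     elif n % 2 == 0:
--         g = 2
--     else:
--         g = 1
--     return n // g
-- ===== Notes on version B (the rewrite author's own statement) =====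
-- stated objective: simpler
-- what changed: Replaced the trial loop over cnt with the closed form n // gcd(n, 6), with gcd(n,6) determined by three residue tests, so there is no loop at all.
import Mathlib
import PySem

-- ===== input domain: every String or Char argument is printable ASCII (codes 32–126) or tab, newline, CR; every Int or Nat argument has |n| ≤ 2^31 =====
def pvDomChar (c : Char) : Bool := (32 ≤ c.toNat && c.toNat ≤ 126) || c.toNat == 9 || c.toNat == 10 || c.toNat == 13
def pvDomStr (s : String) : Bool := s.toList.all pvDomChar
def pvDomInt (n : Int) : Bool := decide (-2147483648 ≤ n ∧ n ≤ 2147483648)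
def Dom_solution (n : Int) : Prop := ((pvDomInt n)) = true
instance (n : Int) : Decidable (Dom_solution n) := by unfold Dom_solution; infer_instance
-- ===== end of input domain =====

-- B replaces A's trial loop over cnt by the closed form n // gcd(n, 6) (gcd found by residue tests); simpler, no loop.

-- ===== PORT A =====
-- A's 'while True' loop incrementing cnt; it always stops by cnt = 6 since (n*6) % 6 = 0,
-- so the recursion terminates with measure 5 - cnt % 6.
def solutionLoop (n : Int) (cnt : Nat) : Int :=
  let c := cnt + 1
  if PySem.Int.mod (n * (c : Int)) 6 = 0 then
    PySem.Int.floordiv (n * (c : Int)) 6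
  else
    solutionLoop n c
termination_by 5 - cnt % 6
decreasing_by
  rename_i h
  have h6 : ¬ (6 ∣ (cnt + 1 : Int)) := by
    intro hd
    exact h (by
      have : (6 : Int) ∣ n * ((cnt + 1 : Nat) : Int) := by
        push_cast; exact Dvd.dvd.mul_left hd n
      simpa [PySem.Int.mod_eq_emod_of_pos (a := n * ((cnt + 1 : Nat) : Int)) (by norm_num : (0:Int) < 6), Int.emod_emod_of_dvd, Int.emod_eq_zero_of_dvd this] using Int.emod_eq_zero_of_dvd this)
  have h6' : ¬ (6 ∣ (cnt + 1)) := by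
    intro hd; exact h6 (by exact_mod_cast Int.natCast_dvd_natCast.mpr hd)
  have : (cnt + 1) % 6 ≠ 0 := by
    intro hz; exact h6' (Nat.dvd_of_mod_eq_zero hz)
  omega

def solution (n : Int) : Int := solutionLoop n 0

-- ===== PORT B =====
def solution_alt (n : Int) : Int :=
  let g : Int :=
    if PySem.Int.mod n 6 = 0 then 6
    else if PySem.Int.mod n 3 = 0 then 3
    else if PySem.Int.mod n 2 = 0 then 2
    else 1
  PySem.Int.floordiv n g

-- ===== PRECONDITION & SPEC =====
def Spec_solution (n : Int) (out : Int) : Prop := out = solution_alt n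
instance (n : Int) (out : Int) : Decidable (Spec_solution n out) := by unfold Spec_solution; infer_instance

-- ===== CLAIM (what is proved, stated in full; the proofs are below) =====
def Claim_equal_solution : Prop := ∀ (n : Int), Dom_solution n → Spec_solution n (solution n)

-- ===== LEMMAS AND PROOFS =====

theorem solution_eq_alt (n : Int) : solution n = solution_alt n := by
  unfold solution solution_alt
  rw [solutionLoop, solutionLoop, solutionLoop, solutionLoop, solutionLoop, solutionLoop]
  simp only [PySem.Int.mod_eq_emod_of_pos (by norm_num : (0:Int) < 6),
    PySem.Int.mod_eq_emod_of_pos (by norm_num : (0:Int) < 3),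
    PySem.Int.mod_eq_emod_of_pos (by norm_num : (0:Int) < 2),
    PySem.Int.floordiv_eq_ediv_of_pos (by norm_num : (0:Int) < 6)]
  push_cast
  split_ifs <;>
    first
      | omega
      | (rw [PySem.Int.floordiv_eq_ediv_of_pos (by norm_num)]; omega)

-- ===== VERDICT (by name: the statement is the Claim_ definition above) =====
theorem solution_spec : Claim_equal_solution := by
  intro n _
  exact solution_eq_alt n
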